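-- pv_equiv track=rewrite | github.com/PuiuTroiu/fundamentele-programarii | Seminar6/ui/console.py | hide_word
-- ===== SOURCE A (Python) =====
-- def hide_word(word,guesses):
--     new_word = ""
--
--     for index in range(len(word)):
--         if index in guesses:
--             new_word += word[index]
--         else:
--             new_word += '_'
--
--     return new_word
-- ===== SOURCE B (Python) =====
-- def hide_word(word, guesses):
--     result = ['_'] * len(word)
--     n = len(word)
--     for g in guesses:
--         if 0 <= g < n:
--             result[g] = word[g]
--     return ''.join(result)
-- ===== Notes on version B (the rewrite author's own statement) =====
-- stated objective: simpler
-- what changed: B scatters revealed characters into a preallocated '_' buffer by iterating over guesses (with a range guard), instead of A's scan over every word position with an 'index in guesses' membership test per position.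
import Mathlib
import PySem

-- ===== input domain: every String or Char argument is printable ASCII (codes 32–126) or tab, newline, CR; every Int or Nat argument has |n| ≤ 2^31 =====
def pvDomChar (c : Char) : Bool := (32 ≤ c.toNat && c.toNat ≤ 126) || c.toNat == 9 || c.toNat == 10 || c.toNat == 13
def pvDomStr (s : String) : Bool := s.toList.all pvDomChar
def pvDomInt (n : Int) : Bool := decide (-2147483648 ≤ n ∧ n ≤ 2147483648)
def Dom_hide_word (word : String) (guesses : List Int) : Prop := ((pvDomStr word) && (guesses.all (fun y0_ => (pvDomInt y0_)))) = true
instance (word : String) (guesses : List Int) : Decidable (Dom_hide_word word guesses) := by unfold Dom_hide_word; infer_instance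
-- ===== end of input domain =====

-- B replaces A's per-position membership scan by scattering revealed characters
-- into a preallocated '_' buffer, iterating over the guesses (objective: simpler decomposition).

-- ===== PORT A =====
-- for index in range(len(word)): new_word += word[index] if index in guesses else '_'
-- (index is always in range, so the pyGetD default ' ' is never used; exact)
def hide_word (word : String) (guesses : List Int) : String :=
  String.ofList
    ((PySem.List.pyRange 0 word.toList.length 1).foldl
      (fun acc index =>
        if index ∈ guesses then acc ++ [PySem.List.pyGetD word.toList index ' ']
        else acc ++ ['_']) [])

-- ===== PORT B =====
-- result = ['_'] * len(word); for g in guesses: if 0 <= g < n: result[g] = word[g]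
-- (g is guarded in range, so pySetD/pyGetD defaults are never used; exact)
def hide_word_alt (word : String) (guesses : List Int) : String :=
  String.ofList
    (guesses.foldl
      (fun res g =>
        if 0 ≤ g ∧ g < (word.toList.length : Int) then
          PySem.List.pySetD res g (PySem.List.pyGetD word.toList g '_')
        else res)
      (PySem.List.pyRepeat ['_'] word.toList.length))

-- ===== PRECONDITION & SPEC =====
def Spec_hide_word (word : String) (guesses : List Int) (out : String) : Prop := out = hide_word_alt word guesses
instance (word : String) (guesses : List Int) (out : String) : Decidable (Spec_hide_word word guesses out) := by unfold Spec_hide_word; infer_instance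

-- ===== CLAIM (what is proved, stated in full; the proofs are below) =====
def Claim_equal_hide_word : Prop := ∀ (word : String) (guesses : List Int), Dom_hide_word word guesses → Spec_hide_word word guesses (hide_word word guesses)

-- ===== LEMMAS AND PROOFS =====

-- A's loop shape: appending one character per index is a map over the range
theorem foldl_append_ite {α β : Type} (p : α → Prop) [DecidablePred p] (f h : α → β)
    (l : List α) (a : List β) :
    l.foldl (fun acc x => if p x then acc ++ [f x] else acc ++ [h x]) a
      = a ++ l.map (fun x => if p x then f x else h x) := by
  induction l generalizing a with
  | nil => simp
  | cons x t ih => by_cases hx : p x <;> simp [hx, ih]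

-- invariant of B's scatter loop: length is preserved and position i holds chars[i]
-- once some guess equals i, the initial buffer's character otherwise
theorem hideB_foldl_invariant (chars : List Char) (gs : List Int) :
    ∀ (res : List Char), res.length = chars.length →
      (gs.foldl
        (fun res g =>
          if 0 ≤ g ∧ g < (chars.length : Int) then
            PySem.List.pySetD res g (PySem.List.pyGetD chars g '_')
          else res) res).length = chars.length ∧
      ∀ i : Nat, i < chars.length →
        PySem.List.pyGetD
          (gs.foldl
            (fun res g =>
              if 0 ≤ g ∧ g < (chars.length : Int) then
                PySem.List.pySetD res g (PySem.List.pyGetD chars g '_')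
              else res) res) (i : Int) '_'
        = if (i : Int) ∈ gs then PySem.List.pyGetD chars (i : Int) '_'
          else PySem.List.pyGetD res (i : Int) '_' := by
  induction gs with
  | nil => intro res h; exact ⟨h, fun i _ => by simp⟩
  | cons g gs ih =>
    intro res h
    by_cases hg : 0 ≤ g ∧ g < (chars.length : Int)
    · have hlen : (PySem.List.pySetD res g (PySem.List.pyGetD chars g '_')).length
          = chars.length := by
        rw [PySem.List.length_pySetD]; exact h
      obtain ⟨h1, h2⟩ := ih _ hlen
      refine ⟨by simpa [hg] using h1, fun i hi => ?_⟩
      simp only [List.foldl_cons, if_pos hg]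
      rw [h2 i hi]
      have hgcast : g = ((g.toNat : Nat) : Int) := by omega
      have hglt : g.toNat < res.length := by omega
      have hset : PySem.List.pyGetD (PySem.List.pySetD res g (PySem.List.pyGetD chars g '_')) (i : Int) '_'
          = if i = g.toNat then PySem.List.pyGetD chars g '_'
            else PySem.List.pyGetD res (i : Int) '_' := by
        have h := PySem.List.pyGetD_pySetD_natCast res g.toNat i
          (PySem.List.pyGetD chars ((g.toNat : Nat) : Int) '_') '_' hglt
        rw [← hgcast] at h
        exact h
      by_cases hmem : (i : Int) ∈ gs
      · simp [hmem]
      · rw [if_neg hmem, hset]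
        by_cases heq : (i : Int) = g
        · have h1' : i = g.toNat := by omega
          have h2' : (i : Int) ∈ g :: gs := by simp [heq]
          rw [if_pos h1', if_pos h2', heq]
        · have h1' : ¬ i = g.toNat := by omega
          have h2' : (i : Int) ∉ g :: gs := by simp [heq, hmem]
          rw [if_neg h1', if_neg h2']
    · obtain ⟨h1, h2⟩ := ih res h
      refine ⟨by simpa [hg] using h1, fun i hi => ?_⟩
      simp only [List.foldl_cons, if_neg hg]
      rw [h2 i hi]
      have heq : ¬ (i : Int) = g := by
        intro he; exact hg ⟨by omega, by omega⟩
      by_cases hmem : (i : Int) ∈ gs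
      · simp [hmem]
      · have h2' : (i : Int) ∉ g :: gs := by simp [heq, hmem]
        rw [if_neg hmem, if_neg h2']

theorem hide_word_eq_alt (word : String) (guesses : List Int) :
    hide_word word guesses = hide_word_alt word guesses := by
  unfold hide_word hide_word_alt
  set chars := word.toList with hchars
  congr 1
  rw [foldl_append_ite (fun index : Int => index ∈ guesses)
      (fun index => PySem.List.pyGetD chars index ' ') (fun _ => '_')]
  have hinit : (PySem.List.pyRepeat ['_'] chars.length).length = chars.length := by
    simp [PySem.List.pyRepeat_singleton]
  obtain ⟨hlen, hget⟩ := hideB_foldl_invariant chars guesses _ hinit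
  apply List.ext_getElem
  · simpa [PySem.List.length_pyRange_one] using hlen.symm
  · intro i hi1 hi2
    have hi : i < chars.length := by
      simpa [PySem.List.length_pyRange_one] using hi1
    have hBlen : i < (guesses.foldl
        (fun res g =>
          if 0 ≤ g ∧ g < (chars.length : Int) then
            PySem.List.pySetD res g (PySem.List.pyGetD chars g '_')
          else res) (PySem.List.pyRepeat ['_'] chars.length)).length := by
      omega
    have hBget : (guesses.foldl
        (fun res g =>
          if 0 ≤ g ∧ g < (chars.length : Int) then
            PySem.List.pySetD res g (PySem.List.pyGetD chars g '_')
          else res) (PySem.List.pyRepeat ['_'] chars.length))[i]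
        = if (i : Int) ∈ guesses then PySem.List.pyGetD chars (i : Int) '_'
          else PySem.List.pyGetD (PySem.List.pyRepeat ['_'] chars.length) (i : Int) '_' := by
      rw [← hget i hi,
        PySem.List.pyGetD_eq_getElem (i := (i : Int)) _ '_' (by omega) (by omega)]
      simp
    simp only [List.nil_append]
    rw [List.getElem_map, PySem.List.getElem_pyRange_one, hBget]
    simp only [zero_add]
    by_cases hmem : (i : Int) ∈ guesses
    · rw [if_pos (by simpa using hmem), if_pos hmem]
      rw [PySem.List.pyGetD_eq_getElem (i := (i : Int)) chars ' ' (by omega) (by omega),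
          PySem.List.pyGetD_eq_getElem (i := (i : Int)) chars '_' (by omega) (by omega)]
    · rw [if_neg (by simpa using hmem), if_neg hmem]
      rw [PySem.List.pyGetD_eq_getElem (i := (i : Int)) _ '_' (by omega)
          (by simp [PySem.List.pyRepeat_singleton]; omega)]
      simp [PySem.List.pyRepeat_singleton]

-- ===== VERDICT (by name: the statement is the Claim_ definition above) =====
theorem hide_word_spec : Claim_equal_hide_word := by
  intro word guesses _
  exact hide_word_eq_alt word guesses
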